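-- pv_equiv track=rewrite | github.com/rafafigo/College-Projects | extras/FP funciona 14/projecto_final.py | juntar3
-- ===== SOURCE A (Python) =====
-- def juntar3(x_tup1,y_tup2,z_tup3):
--     tup1_ele = 0
--     tup2_ele = 0
--     tup3_ele = 0
--     while tup3_ele < len(z_tup3): #Vai passando por cada um dos seus elementos e juntar aos 2 outros
--         while tup2_ele<len(y_tup2): # Vai passando por cada um dos seus elementos e juntar ao tup1
--             while tup1_ele<len(x_tup1):
--                 juntar_123 = x_tup1[tup1_ele] + y_tup2[tup2_ele] + z_tup3[tup3_ele]  #Junta os elementos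
--                 if (tup1_ele == 0) and (tup2_ele == 0) and (tup3_ele == 0):
--                     tup_123 = (juntar_123,) #Transforma a juncao num tuple
--                 else:
--                     tup_123 = tup_123 + (juntar_123,) # junta os tuples
--                 tup1_ele = tup1_ele + 1 # passa para o segundo elemento e volta a receber
--             tup2_ele = tup2_ele + 1  # Passa para o elemento seguinte
--             tup1_ele = 0 # O seguinte elemento passa novamente por todos os elementos de x_tup1
--         tup3_ele = tup3_ele + 1 #Passa para o elemento seguinte
--         tup2_ele = 0 # O seguinte elemento volta a passar por todos os elementos do x_tup2
--         tup1_ele = 0 # Volta a passar por todos os elementos do x_tup1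
--     return tup_123
-- ===== SOURCE B (Python) =====
-- def juntar3(x_tup1, y_tup2, z_tup3):
--     yz = []
--     for zk in z_tup3:
--         for yj in y_tup2:
--             yz.append(yj + zk)
--     return tuple(xi + s for s in yz for xi in x_tup1)
-- ===== Notes on version B (the rewrite author's own statement) =====
-- stated objective: faster
-- what changed: Replaces A's index-counting triple while-loop, which grows the result by quadratic repeated tuple concatenation with a first-element sentinel, by two passes: precompute the y+z suffix list once, then emit each x element joined to each suffix via a single flat generator built into a tuple once.
import Mathlib
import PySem

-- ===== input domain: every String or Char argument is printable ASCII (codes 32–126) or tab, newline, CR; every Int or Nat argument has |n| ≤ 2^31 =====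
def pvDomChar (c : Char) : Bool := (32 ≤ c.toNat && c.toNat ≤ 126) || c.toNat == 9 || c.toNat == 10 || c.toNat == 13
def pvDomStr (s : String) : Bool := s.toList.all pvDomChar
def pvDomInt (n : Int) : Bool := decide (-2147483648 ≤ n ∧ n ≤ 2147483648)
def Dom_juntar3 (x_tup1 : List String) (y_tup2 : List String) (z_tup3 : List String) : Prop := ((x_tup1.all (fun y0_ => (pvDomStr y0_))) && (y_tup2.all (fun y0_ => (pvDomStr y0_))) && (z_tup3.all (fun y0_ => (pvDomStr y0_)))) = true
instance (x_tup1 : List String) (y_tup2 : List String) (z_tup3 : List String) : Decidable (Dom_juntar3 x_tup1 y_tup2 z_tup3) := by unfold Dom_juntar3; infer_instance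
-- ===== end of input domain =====

-- B replaces A's index-counting triple while-loop (which grows the result by repeated tuple
-- concatenation with a first-element sentinel) by two passes: build the y+z suffix list, then emit
-- each x element joined to each suffix into one tuple (objective: faster, measured).


-- ===== PORT A =====
-- the innermost while loop over x_tup1 (indices from 0); acc is `tup_123`, `none` = not yet assigned
def juntar3_innerA (x_tup1 : List String) (yj zk : String) (j k : Int)
    (acc : Option (List String)) : Option (List String) :=
  (PySem.List.enumerate x_tup1 0).foldl (fun acc ix =>
    if ix.1 = 0 ∧ j = 0 ∧ k = 0 then some [ix.2 ++ yj ++ zk]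
    else some (acc.getD [] ++ [ix.2 ++ yj ++ zk])) acc

-- the middle while loop over y_tup2
def juntar3_midA (x_tup1 y_tup2 : List String) (zk : String) (k : Int)
    (acc : Option (List String)) : Option (List String) :=
  (PySem.List.enumerate y_tup2 0).foldl (fun acc jy => juntar3_innerA x_tup1 jy.2 zk jy.1 k acc) acc

-- outer while loop over z_tup3; `.getD []` only hits the `none` case outside Pre_ (Python: UnboundLocalError)
def juntar3 (x_tup1 : List String) (y_tup2 : List String) (z_tup3 : List String) : List String :=
  ((PySem.List.enumerate z_tup3 0).foldl
    (fun acc kz => juntar3_midA x_tup1 y_tup2 kz.2 kz.1 acc) none).getD []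

-- ===== PORT B =====
def juntar3_alt (x_tup1 : List String) (y_tup2 : List String) (z_tup3 : List String) : List String :=
  let yz := z_tup3.foldl (fun acc zk => y_tup2.foldl (fun acc2 yj => acc2 ++ [yj ++ zk]) acc) []
  yz.flatMap (fun s => x_tup1.map (fun xi => xi ++ s))

-- ===== PRECONDITION & SPEC =====
-- Pre_ excludes exactly the inputs where A raises UnboundLocalError: any of the three lists empty.
def Pre_juntar3 (x_tup1 : List String) (y_tup2 : List String) (z_tup3 : List String) : Prop :=
  x_tup1 ≠ [] ∧ y_tup2 ≠ [] ∧ z_tup3 ≠ []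
instance (x_tup1 : List String) (y_tup2 : List String) (z_tup3 : List String) : Decidable (Pre_juntar3 x_tup1 y_tup2 z_tup3) := by unfold Pre_juntar3; infer_instance

def pvWitness_juntar3 : List String × List String × List String := (["a", "b"], ["c"], ["d", "e"])

def Spec_juntar3 (x_tup1 : List String) (y_tup2 : List String) (z_tup3 : List String) (out : List String) : Prop := out = juntar3_alt x_tup1 y_tup2 z_tup3
instance (x_tup1 : List String) (y_tup2 : List String) (z_tup3 : List String) (out : List String) : Decidable (Spec_juntar3 x_tup1 y_tup2 z_tup3 out) := by unfold Spec_juntar3; infer_instance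

-- ===== CLAIM (what is proved, stated in full; the proofs are below) =====
def Claim_equal_juntar3 : Prop := ∀ (x_tup1 : List String) (y_tup2 : List String) (z_tup3 : List String), Dom_juntar3 x_tup1 y_tup2 z_tup3 → Pre_juntar3 x_tup1 y_tup2 z_tup3 → Spec_juntar3 x_tup1 y_tup2 z_tup3 (juntar3 x_tup1 y_tup2 z_tup3)
-- ===== LEMMAS AND PROOFS =====

-- inner fold, when the sentinel branch can never fire on any element of l
theorem juntar3_inner_no_first (yj zk : String) (j k : Int) :
    ∀ (l : List (Int × String)) (L : List String),
      (∀ p ∈ l, ¬(p.1 = 0 ∧ j = 0 ∧ k = 0)) →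
      l.foldl (fun acc ix =>
        if ix.1 = 0 ∧ j = 0 ∧ k = 0 then some [ix.2 ++ yj ++ zk]
        else some (acc.getD [] ++ [ix.2 ++ yj ++ zk])) (some L)
        = some (L ++ l.map (fun p => p.2 ++ yj ++ zk)) := by
  intro l
  induction l with
  | nil => intro L _; simp
  | cons p l ih =>
      intro L h
      have hp := h p (List.mem_cons_self)
      simp only [List.foldl_cons, if_neg hp, Option.getD_some]
      rw [ih (L ++ [p.2 ++ yj ++ zk]) (fun q hq => h q (List.mem_cons_of_mem _ hq))]
      simp

theorem juntar3_map_enum (x_tup1 : List String) (yj zk : String) (s : Int) :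
    (PySem.List.enumerate x_tup1 s).map (fun p => p.2 ++ yj ++ zk)
      = x_tup1.map (fun xi => xi ++ yj ++ zk) := by
  have h := PySem.List.map_snd_enumerate (xs := x_tup1) (s := s)
  calc (PySem.List.enumerate x_tup1 s).map (fun p => p.2 ++ yj ++ zk)
      = ((PySem.List.enumerate x_tup1 s).map (fun p => p.2)).map (fun xi => xi ++ yj ++ zk) := by
        rw [List.map_map]
        rfl
    _ = x_tup1.map (fun xi => xi ++ yj ++ zk) := by rw [h]

theorem juntar3_innerA_not00 (x_tup1 : List String) (yj zk : String) (j k : Int)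
    (h : ¬(j = 0 ∧ k = 0)) (L : List String) :
    juntar3_innerA x_tup1 yj zk j k (some L)
      = some (L ++ x_tup1.map (fun xi => xi ++ yj ++ zk)) := by
  unfold juntar3_innerA
  rw [juntar3_inner_no_first yj zk j k _ L (fun p _ hp => h ⟨hp.2.1, hp.2.2⟩),
      juntar3_map_enum]

theorem juntar3_innerA_first (x0 : String) (xs : List String) (yj zk : String)
    (j k : Int) (hj : j = 0) (hk : k = 0) (acc : Option (List String)) :
    juntar3_innerA (x0 :: xs) yj zk j k acc
      = some ((x0 :: xs).map (fun xi => xi ++ yj ++ zk)) := by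
  unfold juntar3_innerA
  rw [PySem.List.enumerate_cons, List.foldl_cons,
      if_pos (⟨rfl, hj, hk⟩ : ((0 : Int), x0).1 = 0 ∧ j = 0 ∧ k = 0)]
  have hne : ∀ p ∈ PySem.List.enumerate xs (0 + 1), ¬(p.1 = 0 ∧ j = 0 ∧ k = 0) := by
    intro p hp
    rw [PySem.List.mem_enumerate_iff] at hp
    obtain ⟨m, hm, rfl⟩ := hp
    intro hcon
    omega
  rw [juntar3_inner_no_first yj zk j k _ _ hne, juntar3_map_enum]
  simp

-- middle fold, when the sentinel branch can never fire (j ≠ 0 for every element, or k ≠ 0)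
theorem juntar3_mid_no_first (x_tup1 : List String) (zk : String) (k : Int) :
    ∀ (l : List (Int × String)) (L : List String),
      (∀ p ∈ l, ¬(p.1 = 0 ∧ k = 0)) →
      l.foldl (fun acc jy => juntar3_innerA x_tup1 jy.2 zk jy.1 k acc) (some L)
        = some (L ++ l.flatMap (fun p => x_tup1.map (fun xi => xi ++ p.2 ++ zk))) := by
  intro l
  induction l with
  | nil => intro L _; simp
  | cons p l ih =>
      intro L h
      have hp := h p (List.mem_cons_self)
      simp only [List.foldl_cons]
      rw [juntar3_innerA_not00 x_tup1 p.2 zk p.1 k hp L,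
          ih _ (fun q hq => h q (List.mem_cons_of_mem _ hq))]
      simp

theorem juntar3_flatMap_enum_snd {alpha beta : Type} (l : List alpha) (s : Int) (g : alpha → List beta) :
    (PySem.List.enumerate l s).flatMap (fun p => g p.2) = l.flatMap g := by
  have h := PySem.List.map_snd_enumerate (xs := l) (s := s)
  calc (PySem.List.enumerate l s).flatMap (fun p => g p.2)
      = ((PySem.List.enumerate l s).map (fun p => p.2)).flatMap g := by
        rw [List.flatMap_map]
    _ = l.flatMap g := by rw [h]

theorem juntar3_midA_not0 (x_tup1 y_tup2 : List String) (zk : String) (k : Int)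
    (hk : k ≠ 0) (L : List String) :
    juntar3_midA x_tup1 y_tup2 zk k (some L)
      = some (L ++ y_tup2.flatMap (fun yj => x_tup1.map (fun xi => xi ++ yj ++ zk))) := by
  unfold juntar3_midA
  rw [juntar3_mid_no_first x_tup1 zk k _ L (fun p _ hp => hk hp.2),
      juntar3_flatMap_enum_snd y_tup2 0 (fun yj => x_tup1.map (fun xi => xi ++ yj ++ zk))]

theorem juntar3_midA_first (x0 : String) (xs : List String) (y0 : String) (ys : List String)
    (zk : String) (k : Int) (hk : k = 0) (acc : Option (List String)) :
    juntar3_midA (x0 :: xs) (y0 :: ys) zk k acc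
      = some ((y0 :: ys).flatMap (fun yj => (x0 :: xs).map (fun xi => xi ++ yj ++ zk))) := by
  unfold juntar3_midA
  rw [PySem.List.enumerate_cons, List.foldl_cons,
      juntar3_innerA_first x0 xs y0 zk 0 k rfl hk acc]
  have hne : ∀ p ∈ PySem.List.enumerate ys (0 + 1), ¬(p.1 = 0 ∧ k = 0) := by
    intro p hp
    rw [PySem.List.mem_enumerate_iff] at hp
    obtain ⟨m, hm, rfl⟩ := hp
    intro hcon
    omega
  rw [juntar3_mid_no_first (x0 :: xs) zk k _ _ hne,
      juntar3_flatMap_enum_snd ys (0 + 1) (fun yj => (x0 :: xs).map (fun xi => xi ++ yj ++ zk))]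
  simp

theorem juntar3_outer (x_tup1 y_tup2 : List String) :
    ∀ (l : List (Int × String)) (L : List String),
      (∀ p ∈ l, p.1 ≠ 0) →
      l.foldl (fun acc kz => juntar3_midA x_tup1 y_tup2 kz.2 kz.1 acc) (some L)
        = some (L ++ l.flatMap (fun q =>
            y_tup2.flatMap (fun yj => x_tup1.map (fun xi => xi ++ yj ++ q.2)))) := by
  intro l
  induction l with
  | nil => intro L _; simp
  | cons p l ih =>
      intro L h
      simp only [List.foldl_cons]
      rw [juntar3_midA_not0 x_tup1 y_tup2 p.2 p.1 (h p List.mem_cons_self) L,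
          ih _ (fun q hq => h q (List.mem_cons_of_mem _ hq))]
      simp

-- A computes the canonical triple flatMap (on nonempty inputs)
theorem juntar3_eq_canonical (x0 : String) (xs : List String) (y0 : String) (ys : List String)
    (z0 : String) (zs : List String) :
    juntar3 (x0 :: xs) (y0 :: ys) (z0 :: zs)
      = (z0 :: zs).flatMap (fun zk =>
          (y0 :: ys).flatMap (fun yj => (x0 :: xs).map (fun xi => xi ++ yj ++ zk))) := by
  unfold juntar3
  rw [PySem.List.enumerate_cons, List.foldl_cons,
      juntar3_midA_first x0 xs y0 ys z0 0 rfl none]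
  have hne : ∀ p ∈ PySem.List.enumerate zs (0 + 1), p.1 ≠ 0 := by
    intro p hp
    rw [PySem.List.mem_enumerate_iff] at hp
    obtain ⟨m, hm, rfl⟩ := hp
    omega
  rw [juntar3_outer (x0 :: xs) (y0 :: ys) _ _ hne,
      juntar3_flatMap_enum_snd zs (0 + 1) (fun zk =>
        (y0 :: ys).flatMap (fun yj => (x0 :: xs).map (fun xi => xi ++ yj ++ zk)))]
  simp [List.flatMap_cons]

-- B computes the same canonical value (associativity of string append)
theorem juntar3_yz_fold (y : List String) :
    ∀ (z : List String) (acc : List String),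
      z.foldl (fun acc zk => y.foldl (fun acc2 yj => acc2 ++ [yj ++ zk]) acc) acc
        = acc ++ z.flatMap (fun zk => y.map (fun yj => yj ++ zk)) := by
  intro z
  induction z with
  | nil => intro acc; simp
  | cons zk zs ih =>
      intro acc
      simp only [List.foldl_cons]
      rw [PySem.List.foldl_append_singleton_eq_map, ih]
      simp

theorem juntar3_alt_eq_canonical (x y z : List String) :
    juntar3_alt x y z
      = z.flatMap (fun zk => y.flatMap (fun yj => x.map (fun xi => xi ++ yj ++ zk))) := by
  unfold juntar3_alt
  rw [juntar3_yz_fold y z [], List.nil_append, List.flatMap_assoc]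
  refine List.flatMap_congr ?_
  intro zk _
  rw [List.flatMap_map]
  refine List.flatMap_congr ?_
  intro yj _
  refine List.map_congr_left ?_
  intro xi _
  rw [String.append_assoc]

-- ===== VERDICT (by name: the statement is the Claim_ definition above) =====
theorem juntar3_spec : Claim_equal_juntar3 := by
  intro x y z _ hpre
  obtain ⟨hx, hy, hz⟩ := hpre
  obtain ⟨x0, xs, rfl⟩ : ∃ a l, x = a :: l := by cases x with | nil => exact absurd rfl hx | cons a l => exact ⟨a, l, rfl⟩
  obtain ⟨y0, ys, rfl⟩ : ∃ a l, y = a :: l := by cases y with | nil => exact absurd rfl hy | cons a l => exact ⟨a, l, rfl⟩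
  obtain ⟨z0, zs, rfl⟩ : ∃ a l, z = a :: l := by cases z with | nil => exact absurd rfl hz | cons a l => exact ⟨a, l, rfl⟩
  unfold Spec_juntar3
  rw [juntar3_eq_canonical, juntar3_alt_eq_canonical]
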